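-- pv_equiv track=rewrite | github.com/Aasthaengg/IBMdataset | Python_codes/p02844/s709864082.py | kanou
-- ===== SOURCE A (Python) =====
-- def kanou(s, i1, i2, i3):
--     target = [i1, i2, i3]
--     target_iter = target.__iter__()
--     now = next(target_iter)
--     for c in s:
--         if c == now:
--             try:
--                 now = next(target_iter)
--             except StopIteration:
--                 return True
--     return False
-- ===== SOURCE B (Python) =====
-- def kanou(s, i1, i2, i3):
--     # Three successive forward searches: each target is located strictly
--     # after the previous match (character-wise equality, as in A).
--     idx = 0
--     for t in (i1, i2, i3):
--         j = next((k for k in range(idx, len(s)) if s[k] == t), None)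
--         if j is None:
--             return False
--         idx = j + 1
--     return True
-- ===== Notes on version B (the rewrite author's own statement) =====
-- stated objective: alternative
-- what changed: Replaces the single pass over s with iterator/StopIteration bookkeeping over the target tuple by three successive index-based forward searches, each resuming strictly after the previous match.
import Mathlib
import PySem

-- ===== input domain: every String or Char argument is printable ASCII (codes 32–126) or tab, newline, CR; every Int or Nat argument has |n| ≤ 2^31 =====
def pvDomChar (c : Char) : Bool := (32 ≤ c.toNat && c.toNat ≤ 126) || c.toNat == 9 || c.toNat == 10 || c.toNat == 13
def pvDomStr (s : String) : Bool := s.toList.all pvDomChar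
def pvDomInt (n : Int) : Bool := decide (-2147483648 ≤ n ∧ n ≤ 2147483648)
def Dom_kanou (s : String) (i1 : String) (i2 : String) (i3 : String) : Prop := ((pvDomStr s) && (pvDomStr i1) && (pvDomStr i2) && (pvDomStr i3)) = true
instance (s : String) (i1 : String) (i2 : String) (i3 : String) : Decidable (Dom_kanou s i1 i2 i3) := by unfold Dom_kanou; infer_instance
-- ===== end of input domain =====

-- B replaces A's single pass with iterator bookkeeping by three successive forward searches (alternative decomposition, same cost).
-- ===== PORT A =====
-- A's for-loop over s with the iterator over [i1,i2,i3]: 'now' is the head, the remaining targets the tail.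
def kanouLoop (cs : List Char) (now : String) (rest : List String) : Bool :=
  match cs with
  | [] => false
  | c :: cs' =>
    if String.mk [c] == now then
      match rest with
      | [] => true                        -- StopIteration: return True
      | n :: r => kanouLoop cs' n r
    else kanouLoop cs' now rest

def kanou (s : String) (i1 : String) (i2 : String) (i3 : String) : Bool :=
  kanouLoop s.toList i1 [i2, i3]

-- ===== PORT B =====
-- next((k for k in range(idx, len(s)) if s[k] == t), None)
def findCharFrom (cs : List Char) (k : Nat) (t : String) : Option Nat :=
  if h : k < cs.length then
    if String.mk [cs[k]] == t then some k else findCharFrom cs (k + 1) t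
  else none
termination_by cs.length - k

-- the for-loop over the target tuple, resuming at idx
def altGo (cs : List Char) (idx : Nat) (ts : List String) : Bool :=
  match ts with
  | [] => true
  | t :: ts' =>
    match findCharFrom cs idx t with
    | none => false
    | some j => altGo cs (j + 1) ts'

def kanou_alt (s : String) (i1 : String) (i2 : String) (i3 : String) : Bool :=
  altGo s.toList 0 [i1, i2, i3]

-- ===== PRECONDITION & SPEC =====
def Spec_kanou (s : String) (i1 : String) (i2 : String) (i3 : String) (out : Bool) : Prop := out = kanou_alt s i1 i2 i3
instance (s : String) (i1 : String) (i2 : String) (i3 : String) (out : Bool) : Decidable (Spec_kanou s i1 i2 i3 out) := by unfold Spec_kanou; infer_instance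

-- ===== CLAIM (what is proved, stated in full; the proofs are below) =====
def Claim_equal_kanou : Prop := ∀ (s : String) (i1 : String) (i2 : String) (i3 : String), Dom_kanou s i1 i2 i3 → Spec_kanou s i1 i2 i3 (kanou s i1 i2 i3)

-- ===== LEMMAS AND PROOFS =====

-- ===== VERDICT (by name: the statement is the Claim_ definition above) =====
-- findCharFrom unfolded one step
theorem findCharFrom_pos (cs : List Char) (k : Nat) (t : String) (h : k < cs.length) :
    findCharFrom cs k t =
      if String.mk [cs[k]] == t then some k else findCharFrom cs (k + 1) t := by
  rw [findCharFrom]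
  simp [h]

theorem findCharFrom_neg (cs : List Char) (k : Nat) (t : String) (h : ¬ k < cs.length) :
    findCharFrom cs k t = none := by
  rw [findCharFrom]
  simp [h]

-- Invariant: A's loop on the suffix of cs from idx equals B's search chain started at idx.
theorem loop_eq_altGo (cs : List Char) : ∀ (n idx : Nat), cs.length - idx = n →
    ∀ (now : String) (rest : List String),
    kanouLoop (cs.drop idx) now rest = altGo cs idx (now :: rest) := by
  intro n
  induction n with
  | zero =>
    intro idx h now rest
    have hlen : cs.length ≤ idx := by omega
    rw [List.drop_eq_nil_of_le hlen]
    simp only [kanouLoop, altGo, findCharFrom_neg cs idx now (by omega)]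
  | succ m ih =>
    intro idx h now rest
    have hlt : idx < cs.length := by omega
    have hdrop : cs.drop idx = cs[idx] :: cs.drop (idx + 1) :=
      List.drop_eq_getElem_cons hlt
    rw [hdrop]
    simp only [kanouLoop, altGo, findCharFrom_pos cs idx now hlt]
    by_cases hc : String.mk [cs[idx]] == now
    · rw [if_pos hc, if_pos hc]
      match rest with
      | [] => rfl
      | n' :: r =>
        have := ih (idx + 1) (by omega) n' r
        exact this
    · rw [if_neg hc, if_neg hc]
      have := ih (idx + 1) (by omega) now rest
      exact this

theorem kanou_spec : Claim_equal_kanou := by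
  intro s i1 i2 i3 _
  unfold Spec_kanou kanou kanou_alt
  have := loop_eq_altGo s.toList (s.toList.length) 0 (by omega) i1 [i2, i3]
  simpa using this
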